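-- pv_equiv track=rewrite | github.com/Augustrains/IR-RAG-System | src/gen_qa/question_generalizer.py | format_numbered_lines
-- ===== SOURCE A (Python) =====
-- def pad_to_five(question_list):
--     question_list = list(question_list or [])
--     if not question_list:
--         return []
--
--     while len(question_list) < 5:
--         question_list.append(question_list[-1])
--
--     return question_list[:5]
--
-- def format_numbered_lines(question_list):
--     question_list = pad_to_five(question_list)
--     if not question_list:
--         return ""
--
--     lines = []
--     for idx, question in enumerate(question_list, start=1):
--         lines.append(f"{idx}. {question}")
--     return "\n".join(lines)
-- ===== SOURCE B (Python) =====
-- def format_numbered_lines(question_list):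
--     ql = list(question_list or [])
--     n = len(ql)
--     if n == 0:
--         return ""
--     return "\n".join(f"{i + 1}. {ql[min(i, n - 1)]}" for i in range(5))
-- ===== Notes on version B (the rewrite author's own statement) =====
-- stated objective: simpler
-- what changed: Replaces the pad-with-a-while-loop-then-number two-phase construction by a single pass over range(5) that clamps the index (ql[min(i, n-1)]), never materializing a padded copy.
import Mathlib
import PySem

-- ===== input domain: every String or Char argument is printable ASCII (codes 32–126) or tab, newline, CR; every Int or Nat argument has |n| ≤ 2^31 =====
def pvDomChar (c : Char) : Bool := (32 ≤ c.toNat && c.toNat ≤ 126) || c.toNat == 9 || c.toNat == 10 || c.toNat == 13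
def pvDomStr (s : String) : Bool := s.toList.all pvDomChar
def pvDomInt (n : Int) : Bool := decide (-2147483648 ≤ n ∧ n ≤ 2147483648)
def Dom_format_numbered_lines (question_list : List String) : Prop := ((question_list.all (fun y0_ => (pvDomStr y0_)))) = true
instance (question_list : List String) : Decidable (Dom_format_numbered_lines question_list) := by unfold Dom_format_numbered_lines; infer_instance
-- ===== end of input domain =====

-- B fuses A's two phases (pad with a while-loop, then number in a second loop) into one
-- numbered pass over range(5) that clamps the index; return values proved equal on all inputs.

-- ===== PORT A =====
-- 'while len(question_list) < 5: question_list.append(question_list[-1])'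
-- (only reached with a nonempty list, so pyGet? ql (-1) is some; .getD "" totalizes it)
def padWhile (ql : List String) : List String :=
  if _h : ql.length < 5 then
    padWhile (ql ++ [((PySem.List.pyGet? ql (-1)).getD "")])
  else ql
termination_by 5 - ql.length
decreasing_by simp; omega

def pad_to_five (question_list : List String) : List String :=
  if question_list = [] then []
  else PySem.List.slice (padWhile question_list) none (some 5)

def format_numbered_lines (question_list : List String) : String :=
  let ql := pad_to_five question_list
  if ql = [] then ""
  else
    let lines := (PySem.List.enumerate ql 1).foldl
      (fun acc p => acc ++ [PySem.Int.toStr p.1 ++ ". " ++ p.2]) []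
    PySem.Str.join "\n" lines

-- ===== PORT B =====
def format_numbered_lines_alt (question_list : List String) : String :=
  let ql := question_list
  let n : Int := ql.length
  if n = 0 then ""
  else
    PySem.Str.join "\n" ((PySem.List.pyRange 0 5 1).map
      (fun i => PySem.Int.toStr (i + 1) ++ ". " ++ PySem.List.pyGetD ql (min i (n - 1)) ""))

-- ===== PRECONDITION & SPEC =====
def Spec_format_numbered_lines (question_list : List String) (out : String) : Prop := out = format_numbered_lines_alt question_list
instance (question_list : List String) (out : String) : Decidable (Spec_format_numbered_lines question_list out) := by unfold Spec_format_numbered_lines; infer_instance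

-- ===== CLAIM (what is proved, stated in full; the proofs are below) =====
def Claim_equal_format_numbered_lines : Prop := ∀ (question_list : List String), Dom_format_numbered_lines question_list → Spec_format_numbered_lines question_list (format_numbered_lines question_list)

-- ===== LEMMAS AND PROOFS =====

theorem fnl_eq (ql : List String) : format_numbered_lines ql = format_numbered_lines_alt ql := by
  have hr : PySem.List.pyRange 0 5 1 = [0, 1, 2, 3, 4] := by decide
  match ql with
  | [] => rfl
  | [a] =>
    simp [format_numbered_lines, format_numbered_lines_alt, pad_to_five, padWhile,
      PySem.List.pyGet?_neg_one, List.getLast?, hr, PySem.List.enumerate,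
      PySem.List.slice_to, PySem.List.pyGetD_zero_cons]
  | [a, b] =>
    simp [format_numbered_lines, format_numbered_lines_alt, pad_to_five, padWhile,
      PySem.List.pyGet?_neg_one, List.getLast?, hr, PySem.List.enumerate,
      PySem.List.slice_to, PySem.List.pyGetD]
  | [a, b, c] =>
    simp [format_numbered_lines, format_numbered_lines_alt, pad_to_five, padWhile,
      PySem.List.pyGet?_neg_one, List.getLast?, hr, PySem.List.enumerate,
      PySem.List.slice_to, PySem.List.pyGetD]
  | [a, b, c, d] =>
    simp [format_numbered_lines, format_numbered_lines_alt, pad_to_five, padWhile,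
      PySem.List.pyGet?_neg_one, List.getLast?, hr, PySem.List.enumerate,
      PySem.List.slice_to, PySem.List.pyGetD]
  | a :: b :: c :: d :: e :: rest =>
    have hp : padWhile (a :: b :: c :: d :: e :: rest) = a :: b :: c :: d :: e :: rest := by
      rw [padWhile]; simp
    have hmin : ∀ i : Int, 0 ≤ i → i ≤ 4 → min i ((rest.length : Int) + 1 + 1 + 1 + 1) = i := by
      intro i h1 h2; omega
    have hne : ¬ ((rest.length : Int) + 1 + 1 + 1 + 1 + 1 = 0) := by omega
    simp [format_numbered_lines, format_numbered_lines_alt, pad_to_five, hp, hr,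
      PySem.List.enumerate, PySem.List.slice_to, hne, hmin, PySem.List.pyGet?_of_nonneg,
      PySem.List.pyGetD]

-- ===== VERDICT (by name: the statement is the Claim_ definition above) =====
theorem format_numbered_lines_spec : Claim_equal_format_numbered_lines := by
  intro ql _
  unfold Spec_format_numbered_lines
  exact fnl_eq ql
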